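-- pv_equiv track=rewrite | github.com/vrthra/SBST22-tutorial | x0_0_Prerequisites.py | remove_empty_nonterminals
-- ===== SOURCE A (Python) =====
-- def copy_grammar(g):
--     return {k:[[t for t in r] for r in g[k]] for k in g}
--
-- def find_empty_keys(g):
--     return [k for k in g if not g[k]]
--
-- def remove_nonterminal(nt, g):
--     new_g = {}
--     for k_ in g:
--         if k_ == nt: continue
--         new_rules = []
--         for rule in g[k_]:
--             if any(t == nt for t in rule): continue
--             new_rules.append(rule)
--         new_g[k_] = new_rules
--     return new_g
--
-- def remove_empty_nonterminals(g):
--     new_g = copy_grammar(g)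
--     removed_keys = []
--     empty_keys = find_empty_keys(new_g)
--     while empty_keys:
--         for k in empty_keys:
--             removed_keys.append(k)
--             new_g = remove_nonterminal(k, new_g)
--         empty_keys = find_empty_keys(new_g)
--     return new_g, removed_keys
-- ===== SOURCE B (Python) =====
-- def remove_empty_nonterminals(g):
--     # One fixed-point over a removed-set; never rebuilds the grammar per key.
--     removed = []
--     R = set()
--     while True:
--         wave = [k for k in g
--                 if k not in R and all(any(t in R for t in rule) for rule in g[k])]
--         if not wave:
--             break
--         removed.extend(wave)
--         R.update(wave)
--     new_g = {k: [rule for rule in g[k] if not any(t in R for t in rule)]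
--              for k in g if k not in R}
--     return new_g, removed
-- ===== Notes on version B (the rewrite author's own statement) =====
-- stated objective: alternative
-- what changed: B never rebuilds the grammar: instead of one remove_nonterminal pass (full grammar copy) per removed key, it iterates a removed-SET to its fixed point (one scan per wave of simultaneously-empty keys) and filters the original grammar once at the end.
import Mathlib
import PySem

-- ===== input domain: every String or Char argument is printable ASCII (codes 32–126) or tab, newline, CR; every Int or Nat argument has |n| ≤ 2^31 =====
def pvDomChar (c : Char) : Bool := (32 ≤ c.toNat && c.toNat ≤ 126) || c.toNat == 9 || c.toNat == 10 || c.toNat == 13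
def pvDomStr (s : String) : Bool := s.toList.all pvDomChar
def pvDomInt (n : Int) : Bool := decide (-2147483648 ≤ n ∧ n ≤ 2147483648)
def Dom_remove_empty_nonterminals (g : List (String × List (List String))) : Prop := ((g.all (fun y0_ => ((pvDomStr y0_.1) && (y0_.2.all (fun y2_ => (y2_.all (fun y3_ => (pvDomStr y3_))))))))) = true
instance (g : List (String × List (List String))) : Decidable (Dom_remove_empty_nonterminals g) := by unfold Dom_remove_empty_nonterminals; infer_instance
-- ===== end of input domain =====

-- B replaces A's repeated grammar rebuilding (one remove_nonterminal pass per removed key)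
-- by a single removed-SET fixed point plus one final filtering pass: simpler, no intermediate grammars.

-- ===== PORT A =====
-- copy_grammar(g): deep copy of the rule lists
def copy_grammar (g : List (String × List (List String))) : List (String × List (List String)) :=
  g.map (fun kv => (kv.1, kv.2.map (fun r => r.map (fun t => t))))

-- find_empty_keys(g): [k for k in g if not g[k]]
def find_empty_keys (g : List (String × List (List String))) : List String :=
  g.filterMap (fun kv => if kv.2.isEmpty then some kv.1 else none)

-- remove_nonterminal(nt, g): drop key nt and every rule mentioning nt (dict with
-- unique keys rebuilt in order = filterMap over the association list, see Pre_)
def remove_nonterminal (nt : String) (g : List (String × List (List String))) : List (String × List (List String)) :=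
  g.filterMap (fun kv =>
    if kv.1 == nt then none
    else some (kv.1, kv.2.filter (fun rule => !(rule.any (fun t => t == nt)))))

-- the while-loop of A; fuel = number of keys + 1 bounds the iterations (each
-- productive iteration removes at least one key from the grammar)
def pvALoop : Nat → List (String × List (List String)) → List String → (List (String × List (List String))) × List String
  | 0, gA, removed => (gA, removed)
  | n+1, gA, removed =>
    let ek := find_empty_keys gA
    if ek.isEmpty then (gA, removed)
    else
      let st := ek.foldl (fun st k => (remove_nonterminal k st.1, st.2 ++ [k])) (gA, removed)
      pvALoop n st.1 st.2

def remove_empty_nonterminals (g : List (String × List (List String))) : (List (String × List (List String))) × List String :=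
  pvALoop (g.length + 1) (copy_grammar g) []

-- ===== PORT B =====
-- wave = [k for k in g if k not in R and all(any(t in R for t in rule) for rule in g[k])]
def pvBWave (g : List (String × List (List String))) (R : PySem.Set String) : List String :=
  g.filterMap (fun kv =>
    if !(PySem.Set.contains R kv.1) && kv.2.all (fun rule => rule.any (fun t => PySem.Set.contains R t))
    then some kv.1 else none)

-- the 'while True' of B; fuel = number of keys + 1 bounds the iterations (each
-- productive iteration adds at least one key of g to R)
def pvBLoop : Nat → List (String × List (List String)) → PySem.Set String → List String → PySem.Set String × List String
  | 0, _, R, removed => (R, removed)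
  | n+1, g, R, removed =>
    let wave := pvBWave g R
    if wave.isEmpty then (R, removed)
    else pvBLoop n g (PySem.Set.update R wave) (removed ++ wave)

def remove_empty_nonterminals_alt (g : List (String × List (List String))) : (List (String × List (List String))) × List String :=
  let st := pvBLoop (g.length + 1) g PySem.Set.empty []
  (g.filterMap (fun kv =>
      if PySem.Set.contains st.1 kv.1 then none
      else some (kv.1, kv.2.filter (fun rule => !(rule.any (fun t => PySem.Set.contains st.1 t))))),
   st.2)

-- ===== PRECONDITION & SPEC =====
-- Pre_ requires the association-list keys to be distinct: the Python parameter is a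
-- dict, which cannot hold duplicate keys, so a duplicate-key list encodes no actual
-- Python input (dict(...) would silently collapse it).
def Pre_remove_empty_nonterminals (g : List (String × List (List String))) : Prop :=
  (g.map Prod.fst).Nodup
instance (g : List (String × List (List String))) : Decidable (Pre_remove_empty_nonterminals g) := by unfold Pre_remove_empty_nonterminals; infer_instance

def pvWitness_remove_empty_nonterminals : (List (String × List (List String))) :=
  [("S", [["A", "x"]]), ("A", [])]

def Spec_remove_empty_nonterminals (g : List (String × List (List String))) (out : (List (String × List (List String))) × List String) : Prop := out = remove_empty_nonterminals_alt g
instance (g : List (String × List (List String))) (out : (List (String × List (List String))) × List String) : Decidable (Spec_remove_empty_nonterminals g out) := by unfold Spec_remove_empty_nonterminals; infer_instance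

-- ===== CLAIM (what is proved, stated in full; the proofs are below) =====
def Claim_equal_remove_empty_nonterminals : Prop := ∀ (g : List (String × List (List String))), Dom_remove_empty_nonterminals g → Pre_remove_empty_nonterminals g → Spec_remove_empty_nonterminals g (remove_empty_nonterminals g)

-- ===== LEMMAS AND PROOFS =====

-- the grammar after removing the set R of keys: keys not in R, rules avoiding R
def pvPrune (R : PySem.Set String) (g : List (String × List (List String))) : List (String × List (List String)) :=
  g.filterMap (fun kv =>
    if PySem.Set.contains R kv.1 then none
    else some (kv.1, kv.2.filter (fun rule => !(rule.any (fun t => PySem.Set.contains R t)))))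

theorem pv_contains_add (R : PySem.Set String) (nt x : String) :
    PySem.Set.contains (PySem.Set.add R nt) x = (PySem.Set.contains R x || x == nt) := by
  rw [Bool.eq_iff_iff]
  simp [PySem.Set.mem_add]

theorem pv_any_or {α : Type} (l : List α) (p q : α → Bool) :
    l.any (fun x => p x || q x) = (l.any p || l.any q) := by
  induction l with
  | nil => rfl
  | cons x xs ih => cases hp : p x <;> cases hq : q x <;> simp [hp, hq, ih]

theorem pv_rules_step (R : PySem.Set String) (nt : String) (rs : List (List String)) :
    (rs.filter (fun r => !(r.any (fun t => PySem.Set.contains R t)))).filter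
        (fun r => !(r.any (fun t => t == nt)))
      = rs.filter (fun r => !(r.any (fun t => PySem.Set.contains (PySem.Set.add R nt) t))) := by
  rw [List.filter_filter]
  apply List.filter_congr
  intro r _
  have h : (r.any fun t => PySem.Set.contains (PySem.Set.add R nt) t)
      = ((r.any fun t => PySem.Set.contains R t) || r.any fun t => t == nt) := by
    simp only [pv_contains_add]; exact pv_any_or r _ _
  rw [h, Bool.not_or, Bool.and_comm]

theorem pv_remove_prune (g : List (String × List (List String))) (R : PySem.Set String) (nt : String) :
    remove_nonterminal nt (pvPrune R g) = pvPrune (PySem.Set.add R nt) g := by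
  unfold remove_nonterminal pvPrune
  rw [List.filterMap_filterMap]
  apply List.filterMap_congr
  intro kv _
  cases h1 : PySem.Set.contains R kv.1
  · rw [if_neg Bool.false_ne_true]
    cases h2 : kv.1 == nt
    · rw [Option.bind_some, if_neg (by simpa using h2), pv_rules_step, pv_contains_add, h1, h2]
      simp
    · rw [Option.bind_some, if_pos (by simpa using h2), pv_contains_add, h1, h2]
      simp
  · rw [pv_contains_add, h1]
    simp

theorem pv_fold_prune (g : List (String × List (List String))) (L : List String) :
    ∀ (R : PySem.Set String) (removed : List String),
    L.foldl (fun st k => (remove_nonterminal k st.1, st.2 ++ [k])) (pvPrune R g, removed)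
      = (pvPrune (PySem.Set.update R L) g, removed ++ L) := by
  induction L with
  | nil => intro R removed; simp [PySem.Set.update]
  | cons k L ih =>
    intro R removed
    simp only [List.foldl_cons, pv_remove_prune]
    rw [ih (PySem.Set.add R k) (removed ++ [k])]
    simp [PySem.Set.update_cons]

theorem pv_filter_not_empty {α : Type} (l : List α) (p : α → Bool) :
    (l.filter (fun x => !p x)).isEmpty = l.all p := by
  induction l with
  | nil => rfl
  | cons x xs ih => cases h : p x <;> simp [h, ih]

theorem pv_wave_eq (g : List (String × List (List String))) (R : PySem.Set String) :
    find_empty_keys (pvPrune R g) = pvBWave g R := by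
  unfold find_empty_keys pvPrune pvBWave
  rw [List.filterMap_filterMap]
  apply List.filterMap_congr
  intro kv _
  cases h1 : PySem.Set.contains R kv.1
  · rw [if_neg Bool.false_ne_true, Option.bind_some, pv_filter_not_empty]
    simp
  · rfl

theorem pv_loop_eq (g : List (String × List (List String))) :
    ∀ (n : Nat) (R : PySem.Set String) (removed : List String),
    pvALoop n (pvPrune R g) removed
      = (pvPrune (pvBLoop n g R removed).1 g, (pvBLoop n g R removed).2) := by
  intro n
  induction n with
  | zero => intro R removed; rfl
  | succ n ih =>
    intro R removed
    simp only [pvALoop, pvBLoop, pv_wave_eq]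
    cases h : (pvBWave g R).isEmpty
    · rw [if_neg Bool.false_ne_true, if_neg Bool.false_ne_true, pv_fold_prune]
      exact ih (PySem.Set.update R (pvBWave g R)) (removed ++ pvBWave g R)
    · rfl

theorem pv_copy_eq (g : List (String × List (List String))) :
    copy_grammar g = pvPrune PySem.Set.empty g := by
  unfold copy_grammar pvPrune
  rw [← List.filterMap_eq_map]
  apply List.filterMap_congr
  intro kv _
  have h1 : PySem.Set.contains PySem.Set.empty kv.1 = false := rfl
  have h2 : kv.2.filter (fun rule => !(rule.any (fun t => PySem.Set.contains PySem.Set.empty t)))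
      = kv.2 := by
    apply List.filter_eq_self.mpr
    intro r _
    simp
  rw [Function.comp_apply, if_neg (by rw [h1]; exact Bool.false_ne_true), h2]
  simp

-- ===== VERDICT (by name: the statement is the Claim_ definition above) =====
theorem remove_empty_nonterminals_spec : Claim_equal_remove_empty_nonterminals := by
  intro g _ _
  unfold Spec_remove_empty_nonterminals
  show remove_empty_nonterminals g = remove_empty_nonterminals_alt g
  unfold remove_empty_nonterminals remove_empty_nonterminals_alt
  rw [pv_copy_eq, pv_loop_eq]
  rfl
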